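-- pv_equiv track=rewrite | github.com/jtom77/iteam-tools | sql_log_assembler.py | resolve_placeholders
-- ===== SOURCE A (Python) =====
-- def resolve_placeholders(sql, param_values):
--     result = ''
--     j = 0
--     for c in sql:
--         if (c == '?' and j < len(param_values)):
--             result = result + param_values[j]
--             j = j+1
--         else:
--             result = result + c
--     return result
-- ===== SOURCE B (Python) =====
-- def resolve_placeholders(sql, param_values):
--     parts = sql.split('?')
--     out = [parts[0]]
--     for i, seg in enumerate(parts[1:]):
--         out.append((param_values[i] if i < len(param_values) else '?') + seg)
--     return ''.join(out)
-- ===== Notes on version B (the rewrite author's own statement) =====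
-- stated objective: idiomatic
-- what changed: B splits the SQL on '?' once and rejoins the segments with the parameters (keeping literal '?' past the param count), instead of A's character-by-character scan with a manual counter and repeated string concatenation.
import Mathlib
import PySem

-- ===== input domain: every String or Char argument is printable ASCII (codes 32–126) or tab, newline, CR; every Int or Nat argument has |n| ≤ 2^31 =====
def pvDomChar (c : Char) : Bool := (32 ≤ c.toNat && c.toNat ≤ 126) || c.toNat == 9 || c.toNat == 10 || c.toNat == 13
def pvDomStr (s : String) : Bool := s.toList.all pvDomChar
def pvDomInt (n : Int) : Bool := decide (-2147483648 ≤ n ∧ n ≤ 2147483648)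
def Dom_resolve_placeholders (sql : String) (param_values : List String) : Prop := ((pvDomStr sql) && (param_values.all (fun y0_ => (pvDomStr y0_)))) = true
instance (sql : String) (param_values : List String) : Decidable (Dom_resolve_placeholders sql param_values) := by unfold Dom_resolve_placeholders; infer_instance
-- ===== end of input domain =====

-- B replaces A's character-by-character scan (with a manual param counter) by split-on-'?'
-- and rejoin with the params; the return values are proved equal on all inputs.

-- ===== PORT A =====
-- A: scan sql char by char, substituting param_values[j] for '?' while params remain.
def resolve_placeholders (sql : String) (param_values : List String) : String :=
  (sql.toList.foldl
    (fun (st : String × Nat) c =>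
      if c = '?' ∧ st.2 < param_values.length then
        (st.1 ++ param_values.getD st.2 "", st.2 + 1)
      else
        (st.1.push c, st.2))
    ("", 0)).1

-- ===== PORT B =====
-- hand port of str.split('?') over the char list: returns (first segment, remaining segments)
def splitQ : List Char → List Char × List (List Char)
  | [] => ([], [])
  | c :: cs =>
      let r := splitQ cs
      if c = '?' then ([], r.1 :: r.2) else (c :: r.1, r.2)

-- Source B's loop over enumerate(parts[1:]): segment i is preceded by param i, or a literal '?'
def joinQ (param_values : List String) (i : Nat) : List (List Char) → String
  | [] => ""
  | seg :: rest =>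
      (if i < param_values.length then param_values.getD i "" else "?")
        ++ String.ofList seg ++ joinQ param_values (i + 1) rest

def resolve_placeholders_alt (sql : String) (param_values : List String) : String :=
  String.ofList (splitQ sql.toList).1 ++ joinQ param_values 0 (splitQ sql.toList).2

-- ===== PRECONDITION & SPEC =====
def Spec_resolve_placeholders (sql : String) (param_values : List String) (out : String) : Prop := out = resolve_placeholders_alt sql param_values
instance (sql : String) (param_values : List String) (out : String) : Decidable (Spec_resolve_placeholders sql param_values out) := by unfold Spec_resolve_placeholders; infer_instance

-- ===== CLAIM (what is proved, stated in full; the proofs are below) =====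
def Claim_equal_resolve_placeholders : Prop := ∀ (sql : String) (param_values : List String), Dom_resolve_placeholders sql param_values → Spec_resolve_placeholders sql param_values (resolve_placeholders sql param_values)

-- ===== LEMMAS AND PROOFS =====

-- A's loop, written as structural recursion over the char list (proof-side model)
def loopA (pv : List String) : List Char → Nat → List Char
  | [], _ => []
  | c :: cs, j =>
      if c = '?' ∧ j < pv.length then
        (pv.getD j "").toList ++ loopA pv cs (j + 1)
      else
        c :: loopA pv cs j

theorem foldlA_eq_loopA (pv : List String) (l : List Char) :
    ∀ (acc : String) (j : Nat),
      (l.foldl (fun (st : String × Nat) c =>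
        if c = '?' ∧ st.2 < pv.length then
          (st.1 ++ pv.getD st.2 "", st.2 + 1)
        else (st.1.push c, st.2)) (acc, j)).1.toList
      = acc.toList ++ loopA pv l j := by
  induction l with
  | nil => intro acc j; simp [loopA]
  | cons c cs ih =>
      intro acc j
      rw [List.foldl_cons]
      by_cases h : c = '?' ∧ j < pv.length
      · simp only [if_pos h]
        rw [ih]
        simp [loopA, h]
      · simp only [if_neg h]
        rw [ih]
        simp [loopA, h]

theorem joinQ_past (pv : List String) (r : List (List Char)) :
    ∀ (i i' : Nat), pv.length ≤ i → pv.length ≤ i' →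
      joinQ pv i r = joinQ pv i' r := by
  induction r with
  | nil => intro i i' _ _; rfl
  | cons seg rest ih =>
      intro i i' hi hi'
      simp only [joinQ, if_neg (by omega : ¬ i < pv.length),
        if_neg (by omega : ¬ i' < pv.length)]
      rw [ih (i + 1) (i' + 1) (by omega) (by omega)]

theorem loopA_eq_split (pv : List String) (l : List Char) :
    ∀ (j : Nat),
      loopA pv l j = (splitQ l).1 ++ (joinQ pv j (splitQ l).2).toList := by
  induction l with
  | nil => intro j; simp [loopA, splitQ, joinQ]
  | cons c cs ih =>
      intro j
      by_cases hc : c = '?'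
      · subst hc
        by_cases hj : j < pv.length
        · simp [loopA, splitQ, joinQ, hj, ih]
        · have ih' := ih j
          rw [joinQ_past pv (splitQ cs).2 j (j + 1) (by omega) (by omega)] at ih'
          simp [loopA, splitQ, joinQ, hj, ih']
      · simp [loopA, splitQ, joinQ, hc, ih]

theorem resolve_eq (sql : String) (pv : List String) :
    resolve_placeholders sql pv = resolve_placeholders_alt sql pv := by
  apply String.ext
  unfold resolve_placeholders resolve_placeholders_alt
  rw [foldlA_eq_loopA, loopA_eq_split]
  simp

-- ===== VERDICT (by name: the statement is the Claim_ definition above) =====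
theorem resolve_placeholders_spec : Claim_equal_resolve_placeholders := by
  intro sql pv _
  exact resolve_eq sql pv
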